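-- pv_equiv track=rewrite | github.com/dog32903290/empty_space | src/empty_space/retrieval.py | merge_cooccurrence
-- ===== SOURCE A (Python) =====
-- def merge_cooccurrence(
--     a: dict[str, dict[str, int]],
--     b: dict[str, dict[str, int]],
-- ) -> dict[str, dict[str, int]]:
--     """Sum two cooccurrence maps. Does not mutate inputs."""
--     result = {k: dict(v) for k, v in a.items()}
--     for sym_a, neighbors in b.items():
--         if sym_a not in result:
--             result[sym_a] = dict(neighbors)
--         else:
--             for sym_b, count in neighbors.items():
--                 result[sym_a][sym_b] = result[sym_a].get(sym_b, 0) + count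
--     return result
-- ===== SOURCE B (Python) =====
-- def merge_cooccurrence(
--     a: dict[str, dict[str, int]],
--     b: dict[str, dict[str, int]],
-- ) -> dict[str, dict[str, int]]:
--     """Sum two cooccurrence maps. Does not mutate inputs.
--
--     Built symmetrically: union of outer keys (a's order, then b-only keys),
--     each inner dict rebuilt by summing over the union of inner keys with get(...,0).
--     """
--     def add(x: dict[str, int], y: dict[str, int]) -> dict[str, int]:
--         keys = list(x) + [k for k in y if k not in x]
--         return {k: x.get(k, 0) + y.get(k, 0) for k in keys}
--
--     outer = list(a) + [k for k in b if k not in a]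
--     return {k: add(a.get(k, {}), b.get(k, {})) for k in outer}
-- ===== Notes on version B (the rewrite author's own statement) =====
-- stated objective: alternative
-- what changed: B builds the result symmetrically from scratch: it maps over the union of outer keys (a's order then b-only keys) and constructs each inner dict with one flat count-merge helper summing x.get(k,0)+y.get(k,0) over the union of inner keys, instead of A's copy-a-then-patch-with-b in-place update loops.
import Mathlib
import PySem

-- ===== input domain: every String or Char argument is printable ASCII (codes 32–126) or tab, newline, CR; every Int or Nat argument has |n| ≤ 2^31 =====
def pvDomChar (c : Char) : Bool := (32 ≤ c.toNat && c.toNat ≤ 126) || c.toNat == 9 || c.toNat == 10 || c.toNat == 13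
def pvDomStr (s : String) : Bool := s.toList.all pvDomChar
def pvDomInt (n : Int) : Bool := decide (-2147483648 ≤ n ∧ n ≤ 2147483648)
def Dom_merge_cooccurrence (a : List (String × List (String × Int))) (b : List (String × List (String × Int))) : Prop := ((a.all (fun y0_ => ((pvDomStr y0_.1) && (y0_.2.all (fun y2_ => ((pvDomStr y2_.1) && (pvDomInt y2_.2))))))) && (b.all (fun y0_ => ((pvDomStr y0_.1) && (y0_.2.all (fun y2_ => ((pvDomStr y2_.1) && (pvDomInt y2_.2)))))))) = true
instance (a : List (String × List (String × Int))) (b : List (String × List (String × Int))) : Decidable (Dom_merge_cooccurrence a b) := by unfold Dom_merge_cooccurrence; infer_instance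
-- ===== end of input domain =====

-- B rebuilds the result symmetrically — union of outer keys, each inner dict rebuilt by one
-- summation helper over the union of inner keys — instead of copying a and patching it with b
-- (objective: alternative decomposition, same cost).

-- ===== PORT A =====
-- result = {k: dict(v) for k, v in a.items()}; then patch with b's entries.
def merge_cooccurrence (a : List (String × List (String × Int))) (b : List (String × List (String × Int))) : List (String × List (String × Int)) :=
  let result : PySem.Dict String (PySem.Dict String Int) :=
    a.foldl (fun r p => r.insert p.1 (PySem.Dict.ofList p.2)) PySem.Dict.empty
  let result :=
    b.foldl (fun r p =>
      if !(r.contains p.1) then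
        r.insert p.1 (PySem.Dict.ofList p.2)
      else
        -- result[sym_a][sym_b] = result[sym_a].get(sym_b, 0) + count (in-place inner update)
        p.2.foldl (fun r q =>
          r.modify p.1 PySem.Dict.empty
            (fun inner => inner.insert q.1 (inner.getD q.1 0 + q.2))) r) result
  result.items.map (fun p => (p.1, p.2.items))

-- ===== PORT B =====
-- add(x, y): one flat count-dict merge over the union of keys; the dict comprehension runs over
-- pairwise-distinct keys, so it is ported as a map over that key list.
def addCounts (x y : PySem.Dict String Int) : List (String × Int) :=
  let keys := x.keys ++ y.keys.filter (fun k => !(x.contains k))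
  keys.map (fun k => (k, x.getD k 0 + y.getD k 0))

def merge_cooccurrence_alt (a : List (String × List (String × Int))) (b : List (String × List (String × Int))) : List (String × List (String × Int)) :=
  let da : PySem.Dict String (List (String × Int)) := ⟨a⟩
  let db : PySem.Dict String (List (String × Int)) := ⟨b⟩
  let outer := da.keys ++ db.keys.filter (fun k => !(da.contains k))
  outer.map (fun k => (k, addCounts ⟨da.getD k []⟩ ⟨db.getD k []⟩))

-- ===== PRECONDITION & SPEC =====
-- Pre_ excludes association lists with a duplicated outer or inner key: such lists do not
-- represent Python dicts (dict[str, dict[str, int]] inputs always have unique keys).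
def Pre_merge_cooccurrence (a : List (String × List (String × Int))) (b : List (String × List (String × Int))) : Prop :=
  (a.map Prod.fst).Nodup ∧ (∀ p ∈ a, (p.2.map Prod.fst).Nodup) ∧
  (b.map Prod.fst).Nodup ∧ (∀ p ∈ b, (p.2.map Prod.fst).Nodup)
instance (a : List (String × List (String × Int))) (b : List (String × List (String × Int))) : Decidable (Pre_merge_cooccurrence a b) := by unfold Pre_merge_cooccurrence; infer_instance

def pvWitness_merge_cooccurrence : (List (String × List (String × Int))) × (List (String × List (String × Int))) :=
  ([("x", [("y", 1), ("z", 2)])], [("x", [("y", 3)]), ("w", [("x", -1)])])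

def Spec_merge_cooccurrence (a : List (String × List (String × Int))) (b : List (String × List (String × Int))) (out : List (String × List (String × Int))) : Prop := out = merge_cooccurrence_alt a b
instance (a : List (String × List (String × Int))) (b : List (String × List (String × Int))) (out : List (String × List (String × Int))) : Decidable (Spec_merge_cooccurrence a b out) := by unfold Spec_merge_cooccurrence; infer_instance

-- ===== CLAIM (what is proved, stated in full; the proofs are below) =====
def Claim_equal_merge_cooccurrence : Prop := ∀ (a : List (String × List (String × Int))) (b : List (String × List (String × Int))), Dom_merge_cooccurrence a b → Pre_merge_cooccurrence a b → Spec_merge_cooccurrence a b (merge_cooccurrence a b)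

-- ===== LEMMAS AND PROOFS =====

-- A's inner update loop, as a function of the inner dict.
def pvInnF (l : List (String × Int)) (d : PySem.Dict String Int) : PySem.Dict String Int :=
  l.foldl (fun d q => d.insert q.1 (d.getD q.1 0 + q.2)) d

theorem pvInnF_cons (q : String × Int) (rest : List (String × Int)) (d : PySem.Dict String Int) :
    pvInnF (q :: rest) d = pvInnF rest (d.insert q.1 (d.getD q.1 0 + q.2)) := rfl

theorem pv_mk_contains {ν : Type} (l : List (String × ν)) (y : String) :
    ((PySem.Dict.mk l).contains y) = ((l.map Prod.fst).contains y) := by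
  rw [PySem.Dict.contains_eq_decide_mem_keys, PySem.Dict.keys_mk]
  simp


theorem pv_ofList_eq_mk {ν : Type} (l : List (String × ν)) (hl : (l.map Prod.fst).Nodup) :
    PySem.Dict.ofList l = PySem.Dict.mk l := by
  apply PySem.Dict.ext
  have h := PySem.Dict.items_foldl_insert_fresh l Prod.fst Prod.snd PySem.Dict.empty
    (by intro p _; simp [PySem.Dict.contains_empty]) hl
  simpa [PySem.Dict.ofList, PySem.Dict.update, PySem.Dict.empty] using h

theorem pv_mk_get?_map {ν ν' : Type} (f : ν → ν') (a : List (String × ν)) (k : String) :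
    (PySem.Dict.mk (a.map (fun p => (p.1, f p.2)))).get? k = ((PySem.Dict.mk a).get? k).map f := by
  induction a with
  | nil => simp [PySem.Dict.get?]
  | cons p rest ih =>
      simp only [List.map_cons]
      rw [PySem.Dict.get?_mk_cons, PySem.Dict.get?_mk_cons]
      by_cases h : p.1 == k <;> simp [h, ih]

theorem pv_innF_getD (l : List (String × Int)) (d : PySem.Dict String Int) (k : String) :
    (pvInnF l d).getD k 0
      = d.getD k 0 + ((l.filter (fun q => q.1 == k)).map Prod.snd).sum := by
  induction l generalizing d with
  | nil => simp [pvInnF]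
  | cons q rest ih =>
      simp only [pvInnF, List.foldl_cons, List.filter_cons] at ih ⊢
      rw [ih]
      by_cases h : q.1 = k
      · simp [h, PySem.Dict.getD_insert_self]; ring
      · rw [PySem.Dict.getD_insert]
        simp [h, Ne.symm h]

theorem pv_sum_filter_eq_getD (l : List (String × Int)) (hl : (l.map Prod.fst).Nodup) (k : String) :
    ((l.filter (fun q => q.1 == k)).map Prod.snd).sum = (PySem.Dict.mk l).getD k 0 := by
  induction l with
  | nil => simp [PySem.Dict.getD, PySem.Dict.get?]
  | cons p rest ih =>
      obtain ⟨pk, pv⟩ := p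
      simp only [List.map_cons, List.nodup_cons] at hl
      simp only [List.filter_cons]
      by_cases h : pk = k
      · have hrest : rest.filter (fun q => q.1 == k) = [] := by
          apply List.filter_eq_nil_iff.mpr
          intro q hq hqk
          exact hl.1 (h ▸ (by simpa using hqk) ▸ List.mem_map_of_mem hq)
        simp [h, hrest, PySem.Dict.getD, PySem.Dict.get?_mk_cons]
      · have hb : (pk == k) = false := by simp [h]
        simp only [hb, PySem.Dict.getD, PySem.Dict.get?_mk_cons]
        simp only [Bool.false_eq_true, if_false]
        exact ih hl.2

theorem pv_insert_getD_self {ν : Type} (d : PySem.Dict String ν) (k : String) (dflt : ν)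
    (hc : d.contains k = true) (hnd : d.keys.Nodup) : d.insert k (d.getD k dflt) = d := by
  apply PySem.Dict.ext
  rw [PySem.Dict.items_insert_of_contains d (d.getD k dflt) hc]
  have h2 : ∀ p ∈ d.items, (if (p.1 == k) then (k, d.getD k dflt) else p) = p := by
    intro p hp
    by_cases h : p.1 = k
    · obtain ⟨pk, pv⟩ := p
      simp only at h; subst h
      have := PySem.Dict.getD_of_mem_items d hp hnd dflt
      simp [this]
    · simp [h]
  calc d.items.map (fun p => if (p.1 == k) then (k, d.getD k dflt) else p)
      = d.items.map id := List.map_congr_left h2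
    _ = d.items := List.map_id _

theorem pv_inner_outer_fold (l : List (String × Int)) (r : PySem.Dict String (PySem.Dict String Int))
    (k : String) (hc : r.contains k = true) (hnd : r.keys.Nodup) :
    l.foldl (fun r q =>
        r.modify k PySem.Dict.empty
          (fun inner => inner.insert q.1 (inner.getD q.1 0 + q.2))) r
      = r.insert k (pvInnF l (r.getD k PySem.Dict.empty)) := by
  induction l generalizing r with
  | nil =>
      simp only [List.foldl_nil, pvInnF]
      exact (pv_insert_getD_self r k PySem.Dict.empty hc hnd).symm
  | cons q rest ih =>
      rw [List.foldl_cons]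
      rw [ih (r.modify k PySem.Dict.empty _)
            (by simp only [PySem.Dict.modify]; exact PySem.Dict.contains_insert_self _ _ _)
            (by simp only [PySem.Dict.modify]; rw [PySem.Dict.keys_insert_of_contains _ _ hc]; exact hnd)]
      simp only [PySem.Dict.modify]
      rw [PySem.Dict.getD_insert_self, PySem.Dict.insert_insert_self, pvInnF_cons]

theorem pv_outer_fold (bs : List (String × List (String × Int)))
    (r : PySem.Dict String (PySem.Dict String Int))
    (hr : r.keys.Nodup) (hb : (bs.map Prod.fst).Nodup) :
    (bs.foldl (fun r p =>
        if !(r.contains p.1) then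
          r.insert p.1 (PySem.Dict.ofList p.2)
        else
          p.2.foldl (fun r q =>
            r.modify p.1 PySem.Dict.empty
              (fun inner => inner.insert q.1 (inner.getD q.1 0 + q.2))) r) r).keys
        = PySem.Set.update r.keys (bs.map Prod.fst)
    ∧ ∀ k : String,
      (bs.foldl (fun r p =>
        if !(r.contains p.1) then
          r.insert p.1 (PySem.Dict.ofList p.2)
        else
          p.2.foldl (fun r q =>
            r.modify p.1 PySem.Dict.empty
              (fun inner => inner.insert q.1 (inner.getD q.1 0 + q.2))) r) r).get? k
        = match r.get? k, (PySem.Dict.mk bs).get? k with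
          | some d, some l => some (pvInnF l d)
          | some d, none => some d
          | none, some l => some (PySem.Dict.ofList l)
          | none, none => none := by
  induction bs generalizing r with
  | nil =>
      refine ⟨by simp [PySem.Set.update], fun k => ?_⟩
      have : (PySem.Dict.mk ([] : List (String × List (String × Int)))).get? k = none := rfl
      rw [List.foldl_nil, this]
      cases r.get? k <;> rfl
  | cons p rest ih =>
      obtain ⟨pk, pl⟩ := p
      simp only [List.map_cons, List.nodup_cons] at hb
      rw [List.foldl_cons]
      by_cases hcp : r.contains pk = true
      · -- existing key: inner update loop
        have hmem : pk ∈ r.keys := (PySem.Dict.contains_iff_mem_keys r pk).mp hcp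
        simp only [hcp, Bool.not_true, Bool.false_eq_true, if_false]
        rw [pv_inner_outer_fold pl r pk hcp hr]
        set r' := r.insert pk (pvInnF pl (r.getD pk PySem.Dict.empty)) with hr'def
        have hkeys' : r'.keys = r.keys := PySem.Dict.keys_insert_of_contains r _ hcp
        have hr'nd : r'.keys.Nodup := hkeys' ▸ hr
        obtain ⟨ihk, ihg⟩ := ih r' hr'nd hb.2
        obtain ⟨d, hd⟩ : ∃ d, r.get? pk = some d := by
          have := PySem.Dict.contains_eq_isSome_get? r pk
          rw [hcp] at this
          cases h : r.get? pk with
          | none => rw [h] at this; simp at this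
          | some d => exact ⟨d, rfl⟩
        have hgetD : r.getD pk PySem.Dict.empty = d := PySem.Dict.getD_of_get?_eq_some r _ hd
        constructor
        · rw [ihk, hkeys', List.map_cons, PySem.Set.update_cons]
          congr 1
          simp [PySem.Set.add, PySem.Set.contains, hmem]
        · intro k
          rw [ihg k]
          by_cases hk : k = pk
          · subst hk
            have hrest : (PySem.Dict.mk rest).get? k = none :=
              (PySem.Dict.get?_eq_none_iff_not_mem_keys _ k).mpr
                (by rw [PySem.Dict.keys_mk]; exact hb.1)
            have hr'g : r'.get? k = some (pvInnF pl d) := by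
              rw [hr'def, hgetD]; exact PySem.Dict.get?_insert_self r k _
            rw [hr'g, hrest, hd, PySem.Dict.get?_mk_cons]
            simp
          · have hr'g : r'.get? k = r.get? k := by
              rw [hr'def]; exact PySem.Dict.get?_insert_of_ne r _ hk
            rw [hr'g, PySem.Dict.get?_mk_cons]
            simp [show (pk == k) = false by simpa using fun h => hk h.symm]
      · have hmem : pk ∉ r.keys := fun h =>
          hcp ((PySem.Dict.contains_iff_mem_keys r pk).mpr h)
        have hcpf : r.contains pk = false := by
          cases h : r.contains pk
          · rfl
          · exact absurd h hcp
        simp only [hcpf, Bool.not_false, if_true]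
        set r' := r.insert pk (PySem.Dict.ofList pl) with hr'def
        have hkeys' : r'.keys = r.keys ++ [pk] :=
          PySem.Dict.keys_insert_of_not_contains r _ hcpf
        have hr'nd : r'.keys.Nodup := by
          rw [hkeys']
          simp only [List.nodup_append, List.nodup_cons, List.not_mem_nil, not_false_iff, List.nodup_nil, true_and, and_true]
          refine ⟨hr, ?_⟩
          intro x hx y hy
          simp only [List.mem_singleton] at hy
          subst hy
          intro h
          subst h
          exact hmem hx
        obtain ⟨ihk, ihg⟩ := ih r' hr'nd hb.2
        constructor
        · rw [ihk, hkeys', List.map_cons, PySem.Set.update_cons]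
          congr 1
          simp [PySem.Set.add, PySem.Set.contains, hmem]
        · intro k
          rw [ihg k]
          by_cases hk : k = pk
          · subst hk
            have hrest : (PySem.Dict.mk rest).get? k = none :=
              (PySem.Dict.get?_eq_none_iff_not_mem_keys _ k).mpr
                (by rw [PySem.Dict.keys_mk]; exact hb.1)
            have hrg : r.get? k = none := (PySem.Dict.get?_eq_none_iff_not_mem_keys r k).mpr hmem
            have hr'g : r'.get? k = some (PySem.Dict.ofList pl) := by
              rw [hr'def]; exact PySem.Dict.get?_insert_self r k _
            rw [hr'g, hrest, hrg, PySem.Dict.get?_mk_cons]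
            simp
          · have hr'g : r'.get? k = r.get? k := by
              rw [hr'def]; exact PySem.Dict.get?_insert_of_ne r _ hk
            rw [hr'g, PySem.Dict.get?_mk_cons]
            simp [show (pk == k) = false by simpa using fun h => hk h.symm]

theorem pv_r0 (a : List (String × List (String × Int))) (ha1 : (a.map Prod.fst).Nodup) :
    a.foldl (fun r p => r.insert p.1 (PySem.Dict.ofList p.2)) PySem.Dict.empty
      = PySem.Dict.mk (a.map (fun p => (p.1, PySem.Dict.ofList p.2))) := by
  apply PySem.Dict.ext
  have h := PySem.Dict.items_foldl_insert_fresh a Prod.fst (fun p => PySem.Dict.ofList p.2)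
    PySem.Dict.empty (by intro p _; simp [PySem.Dict.contains_empty]) ha1
  simpa [PySem.Dict.empty] using h


theorem pv_rebuild (la : List (String × Int)) (h : (la.map Prod.fst).Nodup) :
    (la.map (fun x => x.1)).map (fun k' => ((k' : String), (PySem.Dict.mk la).getD k' 0)) = la := by
  have h2 := PySem.Dict.items_eq_map_keys (PySem.Dict.mk la)
    (by simpa [PySem.Dict.keys_mk] using h) 0
  rw [PySem.Dict.keys_mk] at h2
  exact h2.symm

-- ===== VERDICT (by name: the statement is the Claim_ definition above) =====
theorem merge_cooccurrence_spec : Claim_equal_merge_cooccurrence := by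
  intro a b _ hpre
  obtain ⟨ha1, ha2, hb1, hb2⟩ := hpre
  show merge_cooccurrence a b = merge_cooccurrence_alt a b
  unfold merge_cooccurrence merge_cooccurrence_alt
  dsimp only []
  rw [pv_r0 a ha1]
  have hnd0 : (PySem.Dict.mk (a.map (fun p => (p.1, PySem.Dict.ofList p.2)))).keys.Nodup := by
    rw [PySem.Dict.keys_mk]; simpa using ha1
  obtain ⟨hK, hG⟩ := pv_outer_fold b _ hnd0 hb1
  have hFnd := hK ▸ PySem.Set.nodup_update _ (b.map Prod.fst) hnd0
  rw [PySem.Dict.items_eq_map_keys _ hFnd PySem.Dict.empty, List.map_map]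
  have hFkeys : (List.foldl (fun r p =>
        if !(r.contains p.1) then
          r.insert p.1 (PySem.Dict.ofList p.2)
        else
          List.foldl (fun r q =>
            r.modify p.1 PySem.Dict.empty
              (fun inner => inner.insert q.1 (inner.getD q.1 0 + q.2))) r p.2)
        (PySem.Dict.mk (a.map (fun p => (p.1, PySem.Dict.ofList p.2)))) b).keys
      = (PySem.Dict.mk a).keys ++
          ((PySem.Dict.mk b).keys.filter (fun y => !((PySem.Dict.mk a).contains y))) := by
    rw [hK, PySem.Dict.keys_mk, PySem.Dict.keys_mk, PySem.Dict.keys_mk]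
    have hmapmap : (a.map (fun p => (p.1, PySem.Dict.ofList p.2))).map (fun x => x.1)
        = a.map (fun x => x.1) := by simp
    rw [hmapmap, PySem.Set.update_eq_append_filter,
        PySem.Set.ofList_eq_self_of_nodup _ (by simpa using hb1)]
    congr 1
    apply List.filter_congr
    intro y _
    rw [pv_mk_contains a y]
    rfl
  rw [hFkeys]
  apply List.map_congr_left
  intro k hkmem
  simp only [Function.comp]
  have hkm : k ∈ (PySem.Dict.mk a).keys ∨ k ∈ (PySem.Dict.mk b).keys := by
    rcases List.mem_append.mp hkmem with h | h
    · exact Or.inl h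
    · exact Or.inr (List.mem_of_mem_filter h)
  have hFg := hG k
  rw [pv_mk_get?_map PySem.Dict.ofList a k] at hFg
  cases hga : (PySem.Dict.mk a).get? k with
  | none =>
    cases hgb : (PySem.Dict.mk b).get? k with
    | none =>
        exfalso
        rcases hkm with h | h
        · exact (PySem.Dict.get?_eq_none_iff_not_mem_keys _ k).mp hga h
        · exact (PySem.Dict.get?_eq_none_iff_not_mem_keys _ k).mp hgb h
    | some lb =>
        rw [hga, hgb] at hFg
        have hlbnd : (lb.map Prod.fst).Nodup := by
          have hmemb : (k, lb) ∈ b := by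
            have := (PySem.Dict.get?_eq_some_iff_mem_items (PySem.Dict.mk b) k lb
              (by rw [PySem.Dict.keys_mk]; simpa using hb1)).mp hgb
            simpa using this
          simpa using hb2 (k, lb) hmemb
        rw [PySem.Dict.getD_eq_get?_getD, hFg]
        simp only [Option.map_none, Option.getD_some]
        rw [PySem.Dict.getD_of_get?_eq_none _ _ hga, PySem.Dict.getD_of_get?_eq_some _ _ hgb]
        rw [pv_ofList_eq_mk lb hlbnd]
        congr 1
        simp only [addCounts, PySem.Dict.keys_mk, List.map_nil, List.nil_append]
        have hcf : ∀ k' : String, ((PySem.Dict.mk ([] : List (String × Int))).contains k') = false :=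
          fun _ => rfl
        simp only [hcf, Bool.not_false, List.filter_true]
        have hg0 : ∀ k' : String, (PySem.Dict.mk ([] : List (String × Int))).getD k' 0 = 0 :=
          fun _ => rfl
        simp only [hg0, zero_add]
        exact (pv_rebuild lb hlbnd).symm
  | some la =>
    have hland : (la.map Prod.fst).Nodup := by
      have hmema : (k, la) ∈ a := by
        have := (PySem.Dict.get?_eq_some_iff_mem_items (PySem.Dict.mk a) k la
          (by rw [PySem.Dict.keys_mk]; simpa using ha1)).mp hga
        simpa using this
      simpa using ha2 (k, la) hmema
    have hndla' : (PySem.Dict.mk la).keys.Nodup := by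
      rw [PySem.Dict.keys_mk]; simpa using hland
    cases hgb : (PySem.Dict.mk b).get? k with
    | none =>
        rw [hga, hgb] at hFg
        rw [PySem.Dict.getD_eq_get?_getD, hFg]
        simp only [Option.map_some, Option.getD_some]
        rw [PySem.Dict.getD_of_get?_eq_some _ _ hga, PySem.Dict.getD_of_get?_eq_none _ _ hgb]
        rw [pv_ofList_eq_mk la hland]
        congr 1
        simp only [addCounts, PySem.Dict.keys_mk, List.map_nil, List.filter_nil, List.append_nil]
        have hg0 : ∀ k' : String, (PySem.Dict.mk ([] : List (String × Int))).getD k' 0 = 0 :=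
          fun _ => rfl
        simp only [hg0, add_zero]
        exact (pv_rebuild la hland).symm
    | some lb =>
        rw [hga, hgb] at hFg
        have hlbnd : (lb.map Prod.fst).Nodup := by
          have hmemb : (k, lb) ∈ b := by
            have := (PySem.Dict.get?_eq_some_iff_mem_items (PySem.Dict.mk b) k lb
              (by rw [PySem.Dict.keys_mk]; simpa using hb1)).mp hgb
            simpa using this
          simpa using hb2 (k, lb) hmemb
        rw [PySem.Dict.getD_eq_get?_getD, hFg]
        simp only [Option.map_some, Option.getD_some]
        rw [PySem.Dict.getD_of_get?_eq_some _ _ hga, PySem.Dict.getD_of_get?_eq_some _ _ hgb]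
        rw [pv_ofList_eq_mk la hland]
        congr 1
        have hndF2 : (pvInnF lb (PySem.Dict.mk la)).keys.Nodup := by
          simp only [pvInnF]
          exact PySem.Dict.nodup_keys_foldl_insert_key lb (fun q => q.1)
            (fun d q => d.getD q.1 0 + q.2) (PySem.Dict.mk la) hndla'
        rw [PySem.Dict.items_eq_map_keys _ hndF2 0]
        have hkeys2 : (pvInnF lb (PySem.Dict.mk la)).keys
            = (la.map (fun x => x.1)) ++
              ((lb.map (fun x => x.1)).filter (fun y => !((PySem.Dict.mk la).contains y))) := by
          simp only [pvInnF]
          rw [PySem.Dict.keys_foldl_insert_key lb (fun q => q.1)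
              (fun d q => d.getD q.1 0 + q.2) (PySem.Dict.mk la)]
          rw [PySem.Dict.keys_mk, PySem.Set.update_eq_append_filter,
              PySem.Set.ofList_eq_self_of_nodup _ (by simpa using hlbnd)]
          congr 1
          apply List.filter_congr
          intro y _
          rw [pv_mk_contains la y]
          rfl
        rw [hkeys2]
        simp only [addCounts, PySem.Dict.keys_mk]
        apply List.map_congr_left
        intro k' _
        have := pv_innF_getD lb (PySem.Dict.mk la) k'
        rw [this, pv_sum_filter_eq_getD lb hlbnd k']
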